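-- pv_equiv track=rewrite | github.com/MultSec/Modules | Payload/Obfuscation/IPv4Fuscation/scripts/prep.py | create_ips_string
-- ===== SOURCE A (Python) =====
-- def create_ips_string(ips):
--     ips_str = ""
--     # Create the string with the IP addresses, for every 4 ips add a new line and a tab
--     for i, ip in enumerate(ips):
--         ips_str += f"\"{ip}\", "
--         if (i+1) % 3 == 0:
--             # If its the last IP address, don't add a new line
--             if i != len(ips) - 1:
--                 ips_str += "\n\t"
--
--     # Remove the last comma
--     ips_str = ips_str[:-2]
--
--     return ips_str
-- ===== SOURCE B (Python) =====
-- def create_ips_string(ips):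
--     groups = [ips[k:k+3] for k in range(0, len(ips), 3)]
--     return ", \n\t".join(", ".join(f'"{ip}"' for ip in g) for g in groups)
-- ===== Notes on version B (the rewrite author's own statement) =====
-- stated objective: simpler
-- what changed: Replaces A's running string accumulator with per-index modulo and last-element tests (plus a final strip of the trailing comma) by slicing the list into chunks of 3 and joining them with the two fixed separators ', ' and ', \n\t'.
import Mathlib
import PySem

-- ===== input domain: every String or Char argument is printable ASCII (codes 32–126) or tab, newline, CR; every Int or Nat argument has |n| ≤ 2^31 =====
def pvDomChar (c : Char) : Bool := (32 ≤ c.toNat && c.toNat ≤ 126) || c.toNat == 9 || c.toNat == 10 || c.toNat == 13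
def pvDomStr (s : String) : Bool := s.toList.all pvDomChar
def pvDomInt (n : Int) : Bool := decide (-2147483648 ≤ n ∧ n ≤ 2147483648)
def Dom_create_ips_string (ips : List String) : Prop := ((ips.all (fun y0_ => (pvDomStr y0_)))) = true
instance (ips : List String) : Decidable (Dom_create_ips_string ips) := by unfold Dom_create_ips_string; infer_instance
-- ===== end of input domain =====

-- B replaces A's running accumulator with modulo/last-element tests by slicing the list
-- into groups of 3 and joining with the two fixed separators (objective: simpler).

-- ===== PORT A =====
-- The loop of A: accumulator string (as List Char, the PySem style), iterating over
-- enumerate(ips); n is len(ips), fixed before the loop.  '(i+1) % 3' uses Lean's Int %,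
-- exact here because both operands are nonnegative (i ≥ 0 from enumerate, divisor 3 > 0).
def createLoopA (n : Int) (s : List Char) : List (Int × String) → List Char
  | [] => s
  | (i, ip) :: rest =>
      let s1 := s ++ ('"' :: (ip.toList ++ ['"', ',', ' ']))      -- ips_str += f"\"{ip}\", "
      let s2 := if (i + 1) % 3 = 0 ∧ i ≠ n - 1 then s1 ++ ['\n', '\t'] else s1
      createLoopA n s2 rest

def create_ips_string (ips : List String) : String :=
  String.ofList (PySem.List.slice
    (createLoopA (ips.length : Int) [] (PySem.List.enumerate ips 0))
    none (some (-2)))                                             -- ips_str[:-2]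

-- ===== PORT B =====
-- groups = [ips[k:k+3] for k in range(0, len(ips), 3)]: consecutive chunks of 3.
def pvChunks (xs : List String) : List (List String) :=
  match xs with
  | [] => []
  | x :: rest => (x :: rest.take 2) :: pvChunks (rest.drop 2)
termination_by xs.length
decreasing_by simp [List.length_drop]

-- f'"{ip}"'
def pvQuote (ip : String) : List Char := '"' :: (ip.toList ++ ['"'])

-- ", ".join(f'"{ip}"' for ip in g)
def pvGroupStr (g : List String) : List Char := PySem.Chars.join [',', ' '] (g.map pvQuote)

-- ", \n\t".join(... for g in groups)
def create_ips_string_alt (ips : List String) : String :=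
  String.ofList (PySem.Chars.join [',', ' ', '\n', '\t'] ((pvChunks ips).map pvGroupStr))

-- ===== PRECONDITION & SPEC =====
def Spec_create_ips_string (ips : List String) (out : String) : Prop := out = create_ips_string_alt ips
instance (ips : List String) (out : String) : Decidable (Spec_create_ips_string ips out) := by unfold Spec_create_ips_string; infer_instance

-- ===== CLAIM (what is proved, stated in full; the proofs are below) =====
def Claim_equal_create_ips_string : Prop := ∀ (ips : List String), Dom_create_ips_string ips → Spec_create_ips_string ips (create_ips_string ips)

-- ===== LEMMAS AND PROOFS =====

theorem pvChunks_nil : pvChunks [] = [] := by rw [pvChunks]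

theorem pvChunks_cons (x : String) (rest : List String) :
    pvChunks (x :: rest) = (x :: rest.take 2) :: pvChunks (rest.drop 2) := by rw [pvChunks]

-- The concatenation of A's loop pieces starting at index i (n = len(ips) fixed).
def piecesA (n i : Int) : List String → List Char
  | [] => []
  | ip :: rest =>
      ('"' :: (ip.toList ++ ['"', ',', ' ']))
        ++ (if (i + 1) % 3 = 0 ∧ i ≠ n - 1 then ['\n', '\t'] else [])
        ++ piecesA n (i + 1) rest

theorem piecesA_cons (n i : Int) (ip : String) (rest : List String) :
    piecesA n i (ip :: rest) =
      ('"' :: (ip.toList ++ ['"', ',', ' ']))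
        ++ (if (i + 1) % 3 = 0 ∧ i ≠ n - 1 then ['\n', '\t'] else [])
        ++ piecesA n (i + 1) rest := rfl

theorem createLoopA_eq (n : Int) (xs : List String) :
    ∀ (i : Int) (s : List Char), createLoopA n s (PySem.List.enumerate xs i) = s ++ piecesA n i xs := by
  induction xs with
  | nil => intro i s; simp [PySem.List.enumerate_nil, createLoopA, piecesA]
  | cons x rest ih =>
      intro i s
      rw [PySem.List.enumerate_cons]
      simp only [createLoopA, piecesA]
      split <;> simp [ih, List.append_assoc]

abbrev joinB (xs : List String) : List Char :=
  PySem.Chars.join [',', ' ', '\n', '\t'] ((pvChunks xs).map pvGroupStr)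

theorem pvChunks_ne_nil (x : String) (xs : List String) : pvChunks (x :: xs) ≠ [] := by
  rw [pvChunks_cons]; simp

theorem joinB_one (a : String) : joinB [a] = pvQuote a := by
  rw [joinB, pvChunks_cons]
  simp [pvChunks_nil, pvGroupStr, PySem.Chars.join_singleton]

theorem joinB_two (a b : String) : joinB [a, b] = pvQuote a ++ [',', ' '] ++ pvQuote b := by
  rw [joinB, pvChunks_cons]
  simp [pvChunks_nil, pvGroupStr, PySem.Chars.join_singleton, PySem.Chars.join_cons_cons,
    List.append_assoc]

theorem joinB_three (a b c : String) :
    joinB [a, b, c] = pvQuote a ++ [',', ' '] ++ pvQuote b ++ [',', ' '] ++ pvQuote c := by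
  rw [joinB, pvChunks_cons]
  simp [pvChunks_nil, pvGroupStr, PySem.Chars.join_singleton, PySem.Chars.join_cons_cons,
    List.append_assoc]

theorem joinB_big (a b c d : String) (rest : List String) :
    joinB (a :: b :: c :: d :: rest) =
      pvQuote a ++ [',', ' '] ++ pvQuote b ++ [',', ' '] ++ pvQuote c
        ++ [',', ' ', '\n', '\t'] ++ joinB (d :: rest) := by
  obtain ⟨g, gs, hgs⟩ : ∃ g gs, pvChunks (d :: rest) = g :: gs := by
    cases h : pvChunks (d :: rest) with
    | nil => exact absurd h (pvChunks_ne_nil d rest)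
    | cons g gs => exact ⟨g, gs, rfl⟩
  rw [joinB, joinB, pvChunks_cons]
  simp only [List.take, List.drop, hgs]
  simp [pvGroupStr, PySem.Chars.join_singleton, PySem.Chars.join_cons_cons, List.append_assoc]

theorem piecesA_eq_joinB : ∀ (m : Nat) (xs : List String) (i : Int), xs.length ≤ m →
    0 ≤ i → i % 3 = 0 → xs ≠ [] →
    piecesA (i + xs.length) i xs = joinB xs ++ [',', ' '] := by
  intro m
  induction m with
  | zero => intro xs i hm _ _ hne; cases xs <;> simp_all
  | succ m ih =>
      intro xs i hm hi h3 hne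
      match xs with
      | [] => exact absurd rfl hne
      | [a] =>
          simp only [piecesA, joinB_one, List.length_cons, List.length_nil]
          push_cast
          split_ifs <;> first
            | (exfalso; omega)
            | simp [pvQuote, List.append_assoc]
      | [a, b] =>
          simp only [piecesA, joinB_two, List.length_cons, List.length_nil]
          push_cast
          split_ifs <;> first
            | (exfalso; omega)
            | simp [pvQuote, List.append_assoc]
      | [a, b, c] =>
          simp only [piecesA, joinB_three, List.length_cons, List.length_nil]
          push_cast
          split_ifs <;> first
            | (exfalso; omega)
            | simp [pvQuote, List.append_assoc]
      | a :: b :: c :: d :: rest =>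
          have hlen : (a :: b :: c :: d :: rest).length = (d :: rest).length + 3 := by
            simp [List.length_cons]
          have ihr := ih (d :: rest) (i + 3)
            (by simp only [List.length_cons] at hm ⊢; omega) (by omega) (by omega) (by simp)
          have hn : (i + 3) + ((d :: rest).length : Int) = i + ((a :: b :: c :: d :: rest).length : Int) := by
            rw [hlen]; push_cast; ring
          rw [hn] at ihr
          rw [piecesA_cons, piecesA_cons, piecesA_cons]
          have hi3 : i + 1 + 1 + 1 = i + 3 := by ring
          rw [hi3, ihr, joinB_big]
          simp only [List.length_cons]
          push_cast
          split_ifs <;> first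
            | (exfalso; omega)
            | simp [pvQuote, List.append_assoc]

-- ===== VERDICT (by name: the statement is the Claim_ definition above) =====
theorem create_ips_string_spec : Claim_equal_create_ips_string := by
  intro ips _
  unfold Spec_create_ips_string create_ips_string create_ips_string_alt
  cases ips with
  | nil => simp [PySem.List.enumerate_nil, createLoopA, pvChunks_nil, PySem.List.slice]
  | cons x rest =>
      rw [createLoopA_eq]
      have h := piecesA_eq_joinB (x :: rest).length (x :: rest) 0 le_rfl le_rfl (by decide)
        (by simp)
      simp only [zero_add] at h
      rw [List.nil_append, h]
      rw [PySem.List.slice_to_neg_ofNat _ 2 (by omega)]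
      simp
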